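-- pv_equiv track=rewrite | github.com/sihyonn/codingtest_python | brute_force/programmers/mock_exam.py | solution
-- ===== SOURCE A (Python) =====
-- def solution(answers):
--     student1 = [1, 2, 3, 4, 5]
--     student2 = [2, 1, 2, 3, 2, 4, 2, 5]
--     student3 = [3, 3, 1, 1, 2, 2, 4, 4, 5, 5]
--
--     scores = [0,0,0]
--
--     for i, ans in enumerate(answers):
--         if ans == student1[i % len(student1)]:
--             scores[0] +=1
--         if ans == student2[i % len(student2)]:
--             scores[1] += 1
--         if ans == student3[i % len(student3)]:
--             scores[2] += 1
--
--     max_score = max(scores)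
--
--     return [i+1 for i, score in enumerate(scores) if score == max_score]
-- ===== SOURCE B (Python) =====
-- def solution(answers):
--     patterns = [
--         [1, 2, 3, 4, 5],
--         [2, 1, 2, 3, 2, 4, 2, 5],
--         [3, 3, 1, 1, 2, 2, 4, 4, 5, 5],
--     ]
--     PERIOD = 40  # lcm of the pattern lengths: every pattern repeats with period 40
--     # Group the answers by (position mod 40, answer value) into a frequency table;
--     # a student's score is then read off with 40 table lookups, independent of n's
--     # structure, instead of comparing each answer against each pattern.
--     freq = {}
--     for i, a in enumerate(answers):
--         key = (i % PERIOD, a)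
--         freq[key] = freq.get(key, 0) + 1
--     scores = [sum(freq.get((r, p[r % len(p)]), 0) for r in range(PERIOD))
--               for p in patterns]
--     max_score = max(scores)
--     return [k + 1 for k, s in enumerate(scores) if s == max_score]
-- ===== Notes on version B (the rewrite author's own statement) =====
-- stated objective: alternative
-- what changed: A compares every answer against all three cyclic patterns in one fused loop with three counters; B instead builds a frequency table keyed by (position mod 40, answer) in one pass and then reads each student's score off with 40 table lookups (40 = lcm of the pattern periods).
import Mathlib
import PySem

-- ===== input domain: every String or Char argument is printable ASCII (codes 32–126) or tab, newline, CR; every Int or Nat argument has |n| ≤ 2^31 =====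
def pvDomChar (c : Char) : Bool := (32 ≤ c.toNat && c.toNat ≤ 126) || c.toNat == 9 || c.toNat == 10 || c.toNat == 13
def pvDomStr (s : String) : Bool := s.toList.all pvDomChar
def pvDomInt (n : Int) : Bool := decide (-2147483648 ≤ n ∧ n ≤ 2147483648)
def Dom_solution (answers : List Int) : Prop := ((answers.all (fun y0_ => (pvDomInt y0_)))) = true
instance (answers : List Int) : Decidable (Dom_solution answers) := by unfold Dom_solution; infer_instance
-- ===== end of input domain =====

-- B replaces A's fused three-counter scan (three pattern comparisons per answer) by a
-- frequency table keyed by (position mod 40, answer) built in one pass, from which each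
-- student's score is read off with 40 lookups (40 = lcm of the pattern periods).

-- ===== PORT A =====
-- A's single for-loop over enumerate(answers), the three list cells as a triple of counters.
def solution (answers : List Int) : List Int :=
  let student1 : List Int := [1, 2, 3, 4, 5]
  let student2 : List Int := [2, 1, 2, 3, 2, 4, 2, 5]
  let student3 : List Int := [3, 3, 1, 1, 2, 2, 4, 4, 5, 5]
  let scores :=
    (PySem.List.enumerate answers).foldl
      (fun (sc : Int × Int × Int) q =>
        (if q.2 = PySem.List.pyGetD student1 (PySem.Int.mod q.1 (student1.length : Int)) 0
           then sc.1 + 1 else sc.1,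
         if q.2 = PySem.List.pyGetD student2 (PySem.Int.mod q.1 (student2.length : Int)) 0
           then sc.2.1 + 1 else sc.2.1,
         if q.2 = PySem.List.pyGetD student3 (PySem.Int.mod q.1 (student3.length : Int)) 0
           then sc.2.2 + 1 else sc.2.2))
      (0, 0, 0)
  let scoreList := [scores.1, scores.2.1, scores.2.2]
  let maxScore := (PySem.List.max? scoreList (fun x => x)).getD 0
  (PySem.List.enumerate scoreList).foldl
    (fun acc p => if p.2 = maxScore then acc ++ [p.1 + 1] else acc) []

-- ===== PORT B =====
-- Source B: one pass builds freq[(i % 40, a)], then each score is 40 table lookups.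
def solution_alt (answers : List Int) : List Int :=
  let patterns : List (List Int) :=
    [[1, 2, 3, 4, 5], [2, 1, 2, 3, 2, 4, 2, 5], [3, 3, 1, 1, 2, 2, 4, 4, 5, 5]]
  let period : Int := 40
  let freq : PySem.Dict (Int × Int) Int :=
    (PySem.List.enumerate answers).foldl
      (fun d q =>
        let key := (PySem.Int.mod q.1 period, q.2)
        d.insert key (d.getD key 0 + 1))
      PySem.Dict.empty
  let scoreList := patterns.map (fun p =>
    ((PySem.List.pyRange 0 period 1).map
      (fun r => freq.getD (r, PySem.List.pyGetD p (PySem.Int.mod r (p.length : Int)) 0) 0)).sum)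
  let maxScore := (PySem.List.max? scoreList (fun x => x)).getD 0
  (PySem.List.enumerate scoreList).foldl
    (fun acc q => if q.2 = maxScore then acc ++ [q.1 + 1] else acc) []

-- ===== PRECONDITION & SPEC =====
def Spec_solution (answers : List Int) (out : List Int) : Prop := out = solution_alt answers
instance (answers : List Int) (out : List Int) : Decidable (Spec_solution answers out) := by unfold Spec_solution; infer_instance

-- ===== CLAIM (what is proved, stated in full; the proofs are below) =====
def Claim_equal_solution : Prop := ∀ (answers : List Int), Dom_solution answers → Spec_solution answers (solution answers)

-- ===== LEMMAS AND PROOFS =====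

-- the per-pattern match count both score computations reduce to
def patCount (p : List Int) (l : List (Int × Int)) : Nat :=
  l.countP (fun q => q.2 == PySem.List.pyGetD p (PySem.Int.mod q.1 (p.length : Int)) 0)

-- A's fused loop computes the three match counts
theorem loopA_eq (l : List (Int × Int)) :
    ∀ (a1 a2 a3 : Int),
      l.foldl
        (fun (sc : Int × Int × Int) q =>
          (if q.2 = PySem.List.pyGetD [1, 2, 3, 4, 5]
                (PySem.Int.mod q.1 (([1, 2, 3, 4, 5] : List Int).length : Int)) 0
             then sc.1 + 1 else sc.1,
           if q.2 = PySem.List.pyGetD [2, 1, 2, 3, 2, 4, 2, 5]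
                (PySem.Int.mod q.1 (([2, 1, 2, 3, 2, 4, 2, 5] : List Int).length : Int)) 0
             then sc.2.1 + 1 else sc.2.1,
           if q.2 = PySem.List.pyGetD [3, 3, 1, 1, 2, 2, 4, 4, 5, 5]
                (PySem.Int.mod q.1 (([3, 3, 1, 1, 2, 2, 4, 4, 5, 5] : List Int).length : Int)) 0
             then sc.2.2 + 1 else sc.2.2))
        (a1, a2, a3)
      = (a1 + patCount [1, 2, 3, 4, 5] l,
         a2 + patCount [2, 1, 2, 3, 2, 4, 2, 5] l,
         a3 + patCount [3, 3, 1, 1, 2, 2, 4, 4, 5, 5] l) := by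
  induction l with
  | nil => intro a1 a2 a3; simp [patCount]
  | cons q rest ih =>
      intro a1 a2 a3
      simp only [List.foldl_cons, ih, patCount, List.countP_cons, Prod.mk.injEq]
      refine ⟨?_, ?_, ?_⟩ <;> split_ifs with h <;> simp_all <;> omega

-- a run of indicator terms over a range with no hit sums to zero
theorem sum_ind_zero (w : Int) (g : Int → Int) (m a b : Int) (h : m < a) :
    ((PySem.List.pyRange a b 1).map
      (fun r => if r = m ∧ g r = w then (1 : Int) else 0)).sum = 0 := by
  apply List.sum_eq_zero
  intro x hx
  simp only [List.mem_map] at hx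
  obtain ⟨r, hr, rfl⟩ := hx
  rw [PySem.List.mem_pyRange_one] at hr
  have : r ≠ m := by omega
  simp [this]

-- summing the one-hot indicator over a range containing m picks out position m
theorem sum_ind (w : Int) (g : Int → Int) (m : Int) :
    ∀ (a b : Int), a ≤ m → m < b →
      ((PySem.List.pyRange a b 1).map
        (fun r => if r = m ∧ g r = w then (1 : Int) else 0)).sum
      = if g m = w then 1 else 0 := by
  intro a
  induction hn : (m - a).toNat generalizing a with
  | zero =>
      intro b ha hb
      have hma : a = m := by omega
      subst hma
      rw [PySem.List.pyRange_one_cons hb, List.map_cons, List.sum_cons,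
        sum_ind_zero w g a (a+1) b (by omega)]
      simp
  | succ n ih =>
      intro b ha hb
      have hlt : a < m := by omega
      rw [PySem.List.pyRange_one_cons (by omega), List.map_cons, List.sum_cons,
        ih (a+1) (by omega) b (by omega) (by omega)]
      have : a ≠ m := by omega
      simp [this]

-- B's 40 table lookups sum to the same match count
theorem scoreB_eq (p : List Int) (hdvd : (p.length : Int) ∣ 40) (hlen : 0 < (p.length : Int))
    (l : List (Int × Int)) :
    ((PySem.List.pyRange 0 40 1).map
      (fun r => ((l.map (fun q => (PySem.Int.mod q.1 40, q.2))).count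
        (r, PySem.List.pyGetD p (PySem.Int.mod r (p.length : Int)) 0) : Int))).sum
    = (patCount p l : Int) := by
  have hmm : ∀ x : Int, PySem.Int.mod (PySem.Int.mod x 40) (p.length : Int)
      = PySem.Int.mod x (p.length : Int) := by
    intro x
    rw [PySem.Int.mod_eq_emod_of_pos (show (0:Int) < 40 by norm_num)]
    rw [PySem.Int.mod_eq_emod_of_pos hlen, PySem.Int.mod_eq_emod_of_pos hlen,
        Int.emod_emod_of_dvd _ hdvd]
  induction l with
  | nil => simp [patCount]
  | cons q rest ih =>
      simp only [List.map_cons, List.count_cons, patCount, List.countP_cons, beq_iff_eq]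
      push_cast
      rw [PySem.List.sum_map_add_int, ih]
      have hrw : (fun r => if ((PySem.Int.mod q.1 40, q.2)
            = (r, PySem.List.pyGetD p (PySem.Int.mod r (p.length : Int)) 0)) then (1:Int) else 0)
          = fun r => if r = PySem.Int.mod q.1 40
              ∧ (fun s => PySem.List.pyGetD p (PySem.Int.mod s (p.length : Int)) 0) r = q.2
            then (1:Int) else 0 := by
        funext r
        congr 1
        simp only [Prod.ext_iff, eq_iff_iff]
        constructor <;> (intro h; exact ⟨h.1.symm, h.2.symm⟩)
      rw [hrw, sum_ind q.2 _ _ 0 40 (PySem.Int.mod_nonneg _ (by norm_num))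
            (PySem.Int.mod_lt _ (by norm_num))]
      simp only [hmm]
      congr 1
      simp [eq_comm]

-- B's dict loop is the library counting fold over the mapped key list
theorem freqB_eq (l : List (Int × Int)) (d : PySem.Dict (Int × Int) Int) :
    l.foldl (fun d q => let key := (PySem.Int.mod q.1 (40:Int), q.2);
                        d.insert key (d.getD key 0 + 1)) d
    = (l.map (fun q => (PySem.Int.mod q.1 40, q.2))).foldl
        (fun d x => d.insert x (d.getD x 0 + 1)) d := by
  rw [List.foldl_map]

-- proof-side views of the shared tail and of the two score computations
def renderTop (scoreList : List Int) : List Int :=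
  let maxScore := (PySem.List.max? scoreList (fun x => x)).getD 0
  (PySem.List.enumerate scoreList).foldl
    (fun acc p => if p.2 = maxScore then acc ++ [p.1 + 1] else acc) []

def scoresA (answers : List Int) : Int × Int × Int :=
  (PySem.List.enumerate answers).foldl
      (fun (sc : Int × Int × Int) q =>
        (if q.2 = PySem.List.pyGetD [1, 2, 3, 4, 5]
              (PySem.Int.mod q.1 (([1, 2, 3, 4, 5] : List Int).length : Int)) 0
           then sc.1 + 1 else sc.1,
         if q.2 = PySem.List.pyGetD [2, 1, 2, 3, 2, 4, 2, 5]
              (PySem.Int.mod q.1 (([2, 1, 2, 3, 2, 4, 2, 5] : List Int).length : Int)) 0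
           then sc.2.1 + 1 else sc.2.1,
         if q.2 = PySem.List.pyGetD [3, 3, 1, 1, 2, 2, 4, 4, 5, 5]
              (PySem.Int.mod q.1 (([3, 3, 1, 1, 2, 2, 4, 4, 5, 5] : List Int).length : Int)) 0
           then sc.2.2 + 1 else sc.2.2))
      (0, 0, 0)

def scoreListB (answers : List Int) : List Int :=
  ([[1, 2, 3, 4, 5], [2, 1, 2, 3, 2, 4, 2, 5], [3, 3, 1, 1, 2, 2, 4, 4, 5, 5]] : List (List Int)).map
    (fun p =>
      ((PySem.List.pyRange 0 40 1).map
        (fun r => (((PySem.List.enumerate answers).foldl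
            (fun (d : PySem.Dict (Int × Int) Int) q =>
              let key := (PySem.Int.mod q.1 (40 : Int), q.2)
              d.insert key (d.getD key 0 + 1))
            PySem.Dict.empty).getD
          (r, PySem.List.pyGetD p (PySem.Int.mod r (p.length : Int)) 0) 0))).sum)

theorem scoresA_eq (answers : List Int) :
    scoresA answers
      = ((patCount [1, 2, 3, 4, 5] (PySem.List.enumerate answers) : Int),
         (patCount [2, 1, 2, 3, 2, 4, 2, 5] (PySem.List.enumerate answers) : Int),
         (patCount [3, 3, 1, 1, 2, 2, 4, 4, 5, 5] (PySem.List.enumerate answers) : Int)) := by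
  unfold scoresA
  exact (loopA_eq (PySem.List.enumerate answers) 0 0 0).trans (by norm_num)

theorem scoreListB_eq (answers : List Int) :
    scoreListB answers
      = [(patCount [1, 2, 3, 4, 5] (PySem.List.enumerate answers) : Int),
         (patCount [2, 1, 2, 3, 2, 4, 2, 5] (PySem.List.enumerate answers) : Int),
         (patCount [3, 3, 1, 1, 2, 2, 4, 4, 5, 5] (PySem.List.enumerate answers) : Int)] := by
  unfold scoreListB
  simp only [freqB_eq, PySem.Dict.getD_foldl_insert_add_one, PySem.Dict.getD_empty, zero_add,
    List.map_cons, List.map_nil]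
  rw [scoreB_eq [1,2,3,4,5] (by norm_num) (by norm_num),
      scoreB_eq [2,1,2,3,2,4,2,5] (by norm_num) (by norm_num),
      scoreB_eq [3,3,1,1,2,2,4,4,5,5] (by norm_num) (by norm_num)]

theorem solution_eq (answers : List Int) : solution answers = solution_alt answers := by
  have hA : solution answers
      = renderTop [(scoresA answers).1, (scoresA answers).2.1, (scoresA answers).2.2] := rfl
  have hB : solution_alt answers = renderTop (scoreListB answers) := rfl
  rw [hA, hB, scoresA_eq, scoreListB_eq]

-- ===== VERDICT (by name: the statement is the Claim_ definition above) =====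
theorem solution_spec : Claim_equal_solution := by
  intro answers _
  unfold Spec_solution
  exact solution_eq answers
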